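-- pv_equiv track=rewrite | github.com/farship/Random | Wikipedia Speedrun Travelling Salesman Problem.py | categorySplit
-- ===== SOURCE A (Python) =====
-- def categorySplit(title_list):
--     no_category_list = []
--     num = 0
--     for i in title_list:
--         if "Category:" in str(i): # breaks too soon if right-side summary box contains a category link
--             if num >= 1:
--                 break
--             else:
--                 num += 1
--         else:
--             no_category_list.append(i)
--     return no_category_list
-- ===== SOURCE B (Python) =====
-- def categorySplit(title_list):
--     marks = [idx for idx, t in enumerate(title_list) if "Category:" in str(t)]
--     cutoff = marks[1] if len(marks) >= 2 else len(title_list)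
--     return [t for t in title_list[:cutoff] if "Category:" not in str(t)]
-- ===== Notes on version B (the rewrite author's own statement) =====
-- stated objective: alternative
-- what changed: Replaces the interleaved count-and-break loop by a two-pass index-then-filter decomposition: first compute the indices of 'Category:' markers via enumerate, cut the list at the second marker (or keep it all), then filter the markers out of that prefix.
import Mathlib
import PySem

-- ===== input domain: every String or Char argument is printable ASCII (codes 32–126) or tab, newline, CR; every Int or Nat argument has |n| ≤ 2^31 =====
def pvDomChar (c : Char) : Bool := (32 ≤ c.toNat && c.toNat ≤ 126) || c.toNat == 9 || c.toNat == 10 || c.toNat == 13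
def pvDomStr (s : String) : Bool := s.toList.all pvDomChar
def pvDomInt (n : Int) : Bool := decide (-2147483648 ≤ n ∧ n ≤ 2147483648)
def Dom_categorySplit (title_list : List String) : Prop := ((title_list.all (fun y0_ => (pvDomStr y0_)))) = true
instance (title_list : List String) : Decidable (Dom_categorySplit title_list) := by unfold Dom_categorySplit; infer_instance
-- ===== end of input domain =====

-- B replaces A's interleaved count-and-break loop by a two-pass index-then-filter decomposition (objective: alternative; return value only, no mutation).

-- ===== PORT A =====
-- the loop, with the running list `no_category_list` (acc) and the marker counter `num`
def categorySplitGo : List String → Int → List String → List String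
  | [], _, acc => acc
  | i :: rest, num, acc =>
    if PySem.Str.isIn "Category:" i then
      if num ≥ 1 then acc
      else categorySplitGo rest (num + 1) acc
    else categorySplitGo rest num (acc ++ [i])

def categorySplit (title_list : List String) : List String :=
  categorySplitGo title_list 0 []

-- ===== PORT B =====
def categorySplit_alt (title_list : List String) : List String :=
  let marks := ((PySem.List.enumerate title_list 0).filter
      (fun p => PySem.Str.isIn "Category:" p.2)).map Prod.fst
  let cutoff : Int := match marks with
    | _ :: j :: _ => j
    | _ => (title_list.length : Int)
  (PySem.List.slice title_list none (some cutoff)).filter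
    (fun t => !(PySem.Str.isIn "Category:" t))

-- ===== PRECONDITION & SPEC =====
def Spec_categorySplit (title_list : List String) (out : List String) : Prop := out = categorySplit_alt title_list
instance (title_list : List String) (out : List String) : Decidable (Spec_categorySplit title_list out) := by unfold Spec_categorySplit; infer_instance

-- ===== CLAIM (what is proved, stated in full; the proofs are below) =====
def Claim_equal_categorySplit : Prop := ∀ (title_list : List String), Dom_categorySplit title_list → Spec_categorySplit title_list (categorySplit title_list)

-- ===== LEMMAS AND PROOFS =====

-- the marker predicate
def catP (s : String) : Bool := PySem.Str.isIn "Category:" s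

-- indices (from offset k) of the marker elements
def marksFrom (k : Int) : List String → List Int
  | [] => []
  | x :: xs => if catP x then k :: marksFrom (k + 1) xs else marksFrom (k + 1) xs

theorem marksFrom_eq_enum (xs : List String) (k : Int) :
    ((PySem.List.enumerate xs k).filter (fun p => PySem.Str.isIn "Category:" p.2)).map Prod.fst
      = marksFrom k xs := by
  induction xs generalizing k with
  | nil => simp [PySem.List.enumerate_nil, marksFrom]
  | cons x xs ih =>
    by_cases h' : PySem.Str.isIn "Category:" x
    · simp [PySem.List.enumerate_cons, marksFrom, catP, h', ih,
        -PySem.Str.isIn_eq]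
    · simp [PySem.List.enumerate_cons, marksFrom, catP, h', ih,
        -PySem.Str.isIn_eq]

theorem marksFrom_shift (xs : List String) (k : Int) :
    marksFrom k xs = (marksFrom 0 xs).map (· + k) := by
  induction xs generalizing k with
  | nil => simp [marksFrom]
  | cons x xs ih =>
    by_cases h : catP x <;>
      simp [marksFrom, h, ih (k + 1), ih 1, List.map_map] <;>
      exact fun a _ => by omega

theorem marksFrom_nonneg (xs : List String) (k j : Int) (hk : 0 ≤ k)
    (hj : j ∈ marksFrom k xs) : 0 ≤ j := by
  induction xs generalizing k with
  | nil => simp [marksFrom] at hj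
  | cons x xs ih =>
    by_cases h : catP x
    · simp [marksFrom, h] at hj
      rcases hj with rfl | hj
      · exact hk
      · exact ih (k + 1) (by omega) hj
    · simp [marksFrom, h] at hj
      exact ih (k + 1) (by omega) hj

-- the first / second cut positions as Nats
def firstCut (xs : List String) : Nat :=
  match marksFrom 0 xs with
  | [] => xs.length
  | j :: _ => j.toNat

def secondCut (xs : List String) : Nat :=
  match marksFrom 0 xs with
  | _ :: j :: _ => j.toNat
  | _ => xs.length

theorem alt_eq_take_filter (xs : List String) :
    categorySplit_alt xs = (xs.take (secondCut xs)).filter (fun t => !(catP t)) := by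
  unfold categorySplit_alt secondCut catP
  rw [marksFrom_eq_enum]
  rcases hm : marksFrom 0 xs with _ | ⟨j1, _ | ⟨j2, rest⟩⟩
  · simp [PySem.List.slice_to _ (by positivity : (0:Int) ≤ (xs.length : Int))]
  · simp [PySem.List.slice_to _ (by positivity : (0:Int) ≤ (xs.length : Int))]
  · have hj2 : 0 ≤ j2 := marksFrom_nonneg xs 0 j2 le_rfl (by rw [hm]; simp)
    simp [PySem.List.slice_to _ hj2]

theorem go_acc (xs : List String) (num : Int) (acc : List String) :
    categorySplitGo xs num acc = acc ++ categorySplitGo xs num [] := by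
  induction xs generalizing num acc with
  | nil => simp [categorySplitGo]
  | cons x xs ih =>
    rw [show ∀ a, categorySplitGo (x :: xs) num a =
        if PySem.Str.isIn "Category:" x then (if num ≥ 1 then a else categorySplitGo xs (num + 1) a)
        else categorySplitGo xs num (a ++ [x]) from fun a => rfl,
      show ∀ a, categorySplitGo (x :: xs) num a =
        if PySem.Str.isIn "Category:" x then (if num ≥ 1 then a else categorySplitGo xs (num + 1) a)
        else categorySplitGo xs num (a ++ [x]) from fun a => rfl]
    split_ifs with h h1
    · simp
    · rw [ih (num + 1) acc]
    · rw [ih num (acc ++ [x]), ih num ([] ++ [x])]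
      simp

theorem marksFrom_cons_pos (x : String) (xs : List String) (h : catP x = true) :
    marksFrom 0 (x :: xs) = 0 :: (marksFrom 0 xs).map (· + 1) := by
  rw [show marksFrom 0 (x :: xs) = if catP x then (0:Int) :: marksFrom 1 xs else marksFrom 1 xs from rfl,
    if_pos h, marksFrom_shift xs 1]

theorem marksFrom_cons_neg (x : String) (xs : List String) (h : ¬ catP x = true) :
    marksFrom 0 (x :: xs) = (marksFrom 0 xs).map (· + 1) := by
  rw [show marksFrom 0 (x :: xs) = if catP x then (0:Int) :: marksFrom 1 xs else marksFrom 1 xs from rfl,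
    if_neg h, marksFrom_shift xs 1]

theorem go_one (xs : List String) :
    categorySplitGo xs 1 [] = (xs.take (firstCut xs)).filter (fun t => !(catP t)) := by
  induction xs with
  | nil => simp [categorySplitGo]
  | cons x xs ih =>
    by_cases h : catP x
    · rw [show categorySplitGo (x :: xs) 1 [] =
          if catP x then (if (1:Int) ≥ 1 then [] else categorySplitGo xs 2 []) else categorySplitGo xs 1 ([] ++ [x]) from rfl,
        if_pos h, if_pos (by omega : (1:Int) ≥ 1)]
      have hfc : firstCut (x :: xs) = 0 := by
        unfold firstCut; rw [marksFrom_cons_pos x xs h]; rfl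
      rw [hfc]
      simp
    · rw [show categorySplitGo (x :: xs) 1 [] =
          if catP x then (if (1:Int) ≥ 1 then [] else categorySplitGo xs 2 []) else categorySplitGo xs 1 ([] ++ [x]) from rfl,
        if_neg h, go_acc, ih]
      have hfc : firstCut (x :: xs) = firstCut xs + 1 := by
        unfold firstCut
        rw [marksFrom_cons_neg x xs h]
        rcases hm : marksFrom 0 xs with _ | ⟨j, rest⟩
        · simp
        · have : 0 ≤ j := marksFrom_nonneg xs 0 j le_rfl (by rw [hm]; simp)
          simp; omega
      rw [hfc]
      simp [h]

theorem go_zero (xs : List String) :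
    categorySplitGo xs 0 [] = (xs.take (secondCut xs)).filter (fun t => !(catP t)) := by
  induction xs with
  | nil => simp [categorySplitGo]
  | cons x xs ih =>
    by_cases h : catP x
    · rw [show categorySplitGo (x :: xs) 0 [] =
          if catP x then (if (0:Int) ≥ 1 then [] else categorySplitGo xs 1 []) else categorySplitGo xs 0 ([] ++ [x]) from rfl,
        if_pos h, if_neg (by omega : ¬ ((0:Int) ≥ 1)), go_one]
      rcases hm : marksFrom 0 xs with _ | ⟨j, rest⟩
      · have hsc : secondCut (x :: xs) = xs.length + 1 := by
          unfold secondCut; rw [marksFrom_cons_pos x xs h, hm]; simp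
        have hfc : firstCut xs = xs.length := by unfold firstCut; rw [hm]
        rw [hsc, hfc]
        simp [h]
      · have hj : 0 ≤ j := marksFrom_nonneg xs 0 j le_rfl (by rw [hm]; simp)
        have hsc : secondCut (x :: xs) = j.toNat + 1 := by
          unfold secondCut; rw [marksFrom_cons_pos x xs h, hm]; simp; omega
        have hfc : firstCut xs = j.toNat := by unfold firstCut; rw [hm]
        rw [hsc, hfc]
        simp [h]
    · rw [show categorySplitGo (x :: xs) 0 [] =
          if catP x then (if (0:Int) ≥ 1 then [] else categorySplitGo xs 1 []) else categorySplitGo xs 0 ([] ++ [x]) from rfl,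
        if_neg h, go_acc, ih]
      have hsc : secondCut (x :: xs) = secondCut xs + 1 := by
        unfold secondCut
        rw [marksFrom_cons_neg x xs h]
        rcases hm : marksFrom 0 xs with _ | ⟨j1, _ | ⟨j2, rest⟩⟩
        · simp
        · simp
        · have : 0 ≤ j2 := marksFrom_nonneg xs 0 j2 le_rfl (by rw [hm]; simp)
          simp; omega
      rw [hsc]
      simp [h]

-- ===== VERDICT (by name: the statement is the Claim_ definition above) =====
theorem categorySplit_spec : Claim_equal_categorySplit := by
  intro xs _
  unfold Spec_categorySplit categorySplit
  rw [go_zero, alt_eq_take_filter]
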